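-- pv_equiv track=rewrite | github.com/Aasthaengg/IBMdataset | Python_codes/p03281/s162632629.py | divnum
-- ===== SOURCE A (Python) =====
-- def divnum(n):
--     res=0
--     for i in range(1,n+1):
--         if n%i==0:
--             res+=1
--     if res==8:
--         return True
--     else:
--         return False
-- ===== SOURCE B (Python) =====
-- def divnum(n):
--     cnt = 0
--     i = 1
--     while i * i <= n:
--         if n % i == 0:
--             cnt += 1 if i * i == n else 2
--         i += 1
--     return cnt == 8
-- ===== Notes on version B (the rewrite author's own statement) =====
-- stated objective: faster
-- what changed: counts divisors in pairs (d, n//d) by trial division only up to sqrt(n) instead of scanning every i in 1..n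
import Mathlib
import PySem

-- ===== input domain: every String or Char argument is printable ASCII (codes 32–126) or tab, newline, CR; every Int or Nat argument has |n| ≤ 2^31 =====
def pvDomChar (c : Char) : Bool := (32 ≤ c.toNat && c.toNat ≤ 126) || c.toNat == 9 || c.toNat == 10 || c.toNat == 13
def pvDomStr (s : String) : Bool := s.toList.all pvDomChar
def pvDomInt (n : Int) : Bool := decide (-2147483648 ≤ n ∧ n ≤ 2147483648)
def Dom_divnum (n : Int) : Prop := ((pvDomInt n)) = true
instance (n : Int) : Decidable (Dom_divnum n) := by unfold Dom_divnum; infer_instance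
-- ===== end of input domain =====

-- B counts divisors in pairs (d, n/d) by trial division up to √n instead of scanning all of 1..n (asymptotically faster).


-- ===== PORT A =====
def divnum (n : Int) : Bool :=
  let res := (PySem.List.pyRange 1 (n + 1) 1).foldl
      (fun res i => if PySem.Int.mod n i = 0 then res + 1 else res) (0 : Int)
  if res = 8 then true else false

-- ===== PORT B =====
-- while i * i <= n: …; i += 1   (cnt weighted 1 for the square root, 2 for a proper pair)
def divnumLoop (n i cnt : Int) : Int :=
  if i * i ≤ n then
    divnumLoop n (i + 1) (if PySem.Int.mod n i = 0 then (if i * i = n then cnt + 1 else cnt + 2) else cnt)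
  else cnt
termination_by (n + 1 - i).toNat
decreasing_by
  rename_i h
  have h2 : (0:Int) ≤ i * i := mul_self_nonneg i
  by_cases hc : i ≤ 0
  · omega
  · have : i ≤ i * i := le_mul_of_one_le_left (by omega) (by omega)
    omega

def divnum_alt (n : Int) : Bool := decide (divnumLoop n 1 0 = 8)

-- ===== PRECONDITION & SPEC =====
def Spec_divnum (n : Int) (out : Bool) : Prop := out = divnum_alt n
instance (n : Int) (out : Bool) : Decidable (Spec_divnum n out) := by unfold Spec_divnum; infer_instance

-- ===== CLAIM (what is proved, stated in full; the proofs are below) =====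
def Claim_equal_divnum : Prop := ∀ (n : Int), Dom_divnum n → Spec_divnum n (divnum n)

-- ===== LEMMAS AND PROOFS =====

-- A's loop: counting Booleans over a list is a countP, and that count is the number of divisors.
lemma countP_range_eq_filter_card (r : Nat) (q : Nat → Bool) :
    (List.range r).countP q = ((Finset.range r).filter (fun k => q k = true)).card := by
  induction r with
  | zero => simp
  | succ r ih =>
    rw [List.range_succ, Finset.range_add_one, List.countP_append, Finset.filter_insert]
    by_cases h : q r = true <;> simp [h, ih, Finset.card_insert_of_notMem]

lemma range_filter_card_eq_divisors (m : Nat) (hm : 1 ≤ m) :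
    ((Finset.range m).filter (fun k => (k + 1) ∣ m)).card = m.divisors.card := by
  refine Finset.card_bij' (fun k _ => k + 1) (fun d _ => d - 1) ?hi ?hj ?hl ?hr
  case hi =>
    intro k hk
    simp only [Finset.mem_filter, Finset.mem_range] at hk
    exact Nat.mem_divisors.mpr ⟨hk.2, by omega⟩
  case hj =>
    intro d hd
    have h1 := Nat.pos_of_mem_divisors hd
    have h2 := Nat.le_of_dvd (by omega) (Nat.mem_divisors.mp hd).1
    simp only [Finset.mem_filter, Finset.mem_range]
    refine ⟨by omega, ?_⟩
    have h3 : d - 1 + 1 = d := by omega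
    rw [h3]; exact (Nat.mem_divisors.mp hd).1
  case hl => intro k _; show k + 1 - 1 = k; omega
  case hr =>
    intro d hd
    have h1 := Nat.pos_of_mem_divisors hd
    show d - 1 + 1 = d; omega

lemma a_count (m : Nat) (hm : 1 ≤ m) :
    (PySem.List.pyRange 1 ((m:Int) + 1) 1).foldl
      (fun res i => if PySem.Int.mod (m:Int) i = 0 then res + 1 else res) (0 : Int)
    = (m.divisors.card : Int) := by
  rw [PySem.List.foldl_ite_add_one, PySem.List.pyRange_one, List.countP_map]
  have h1 : ((m:Int) + 1 - 1).toNat = m := by omega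
  rw [h1, countP_range_eq_filter_card]
  have h2 : ((Finset.range m).filter
      (fun k => ((fun i => decide (PySem.Int.mod (m:Int) i = 0)) ∘ fun k : Nat => (1:Int) + ↑k) k = true))
      = (Finset.range m).filter (fun k => (k + 1) ∣ m) := by
    apply Finset.filter_congr
    intro k _
    simp only [Function.comp, decide_eq_true_eq, PySem.Int.mod_eq_zero_iff_dvd]
    constructor
    · intro h
      have h' : ((k + 1 : Nat) : Int) ∣ (m : Int) := by push_cast; rwa [add_comm]
      exact_mod_cast h'
    · intro h
      have h' : ((k + 1 : Nat) : Int) ∣ (m : Int) := by exact_mod_cast h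
      push_cast at h'; rwa [add_comm] at h'
  rw [h2, range_filter_card_eq_divisors m hm]
  simp

-- B's loop computes the weighted sum over the small divisors d ≥ j.
lemma loop_eq (m j : Nat) (hm : 1 ≤ m) (hj : 1 ≤ j) (cnt : Int) :
    divnumLoop (m:Int) (j:Int) cnt
      = cnt + ∑ d ∈ (Finset.Ico j (m + 1)).filter (fun d => d ∣ m ∧ d * d ≤ m),
          (if d * d = m then (1:Int) else 2) := by
  rw [divnumLoop.eq_def]
  by_cases h : (j:Int) * (j:Int) ≤ (m:Int)
  · have hjj : j * j ≤ m := by exact_mod_cast h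
    have hjm : j ≤ m := le_trans (Nat.le_mul_of_pos_left j hj) hjj
    have hsplit : Finset.Ico j (m + 1) = insert j (Finset.Ico (j + 1) (m + 1)) :=
      (Finset.insert_Ico_add_one_left_eq_Ico (by omega)).symm
    have hnotmem : j ∉ (Finset.Ico (j + 1) (m + 1)).filter (fun d => d ∣ m ∧ d * d ≤ m) := by
      simp [Finset.mem_Ico]
    rw [if_pos h]
    have hcast : ((j:Int) * (j:Int) = (m:Int)) ↔ (j * j = m) := by exact_mod_cast Iff.rfl
    have hmodiff : (PySem.Int.mod (m:Int) (j:Int) = 0) ↔ j ∣ m := by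
      rw [PySem.Int.mod_eq_zero_iff_dvd]; exact Int.natCast_dvd_natCast
    by_cases hdvd : j ∣ m
    · rw [if_pos (hmodiff.mpr hdvd), hsplit, Finset.filter_insert,
        if_pos (show j ∣ m ∧ j * j ≤ m from ⟨hdvd, hjj⟩), Finset.sum_insert hnotmem]
      by_cases hsq : j * j = m
      · rw [if_pos (hcast.mpr hsq), if_pos hsq]
        have hrec := loop_eq m (j + 1) hm (by omega) (cnt + 1)
        push_cast at hrec
        rw [hrec]; ring
      · rw [if_neg (fun hc => hsq (hcast.mp hc)), if_neg hsq]
        have hrec := loop_eq m (j + 1) hm (by omega) (cnt + 2)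
        push_cast at hrec
        rw [hrec]; ring
    · rw [if_neg (fun hc => hdvd (hmodiff.mp hc)), hsplit, Finset.filter_insert,
        if_neg (fun hc : j ∣ m ∧ _ => hdvd hc.1)]
      have hrec := loop_eq m (j + 1) hm (by omega) cnt
      push_cast at hrec
      rw [hrec]
  · rw [if_neg h]
    have hempty : (Finset.Ico j (m + 1)).filter (fun d => d ∣ m ∧ d * d ≤ m) = ∅ := by
      apply Finset.filter_eq_empty_iff.mpr
      intro d hd
      simp only [Finset.mem_Ico] at hd
      rintro ⟨-, hdd⟩
      have h1 : j * j ≤ d * d := Nat.mul_le_mul hd.1 hd.1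
      exact h (by exact_mod_cast le_trans h1 hdd)
    rw [hempty, Finset.sum_empty, add_zero]
termination_by m + 1 - j
decreasing_by all_goals omega

-- the √-pairing: d ↦ m / d is a bijection between small and large divisors
lemma small_large_card (m : Nat) (hm : 1 ≤ m) :
    (m.divisors.filter (fun d => d * d ≤ m)).card
      = (m.divisors.filter (fun d => m ≤ d * d)).card := by
  refine Finset.card_bij' (fun d _ => m / d) (fun d _ => m / d) ?hi ?hj ?hl ?hr
  case hi =>
    intro d hd
    simp only [Finset.mem_filter, Nat.mem_divisors] at hd ⊢
    obtain ⟨⟨hdvd, hm0⟩, hdd⟩ := hd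
    have hd0 : 0 < d := Nat.pos_of_dvd_of_pos hdvd (by omega)
    have hmul : d * (m / d) = m := Nat.mul_div_cancel' hdvd
    have hle : d ≤ m / d := Nat.le_of_mul_le_mul_left (by omega) hd0
    refine ⟨⟨Nat.div_dvd_of_dvd hdvd, hm0⟩, ?_⟩
    calc m = d * (m / d) := hmul.symm
      _ ≤ (m / d) * (m / d) := Nat.mul_le_mul_right _ hle
  case hj =>
    intro d hd
    simp only [Finset.mem_filter, Nat.mem_divisors] at hd ⊢
    obtain ⟨⟨hdvd, hm0⟩, hdd⟩ := hd
    have hd0 : 0 < d := Nat.pos_of_dvd_of_pos hdvd (by omega)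
    have hmul : d * (m / d) = m := Nat.mul_div_cancel' hdvd
    have hle : m / d ≤ d := Nat.le_of_mul_le_mul_left (by omega) hd0
    refine ⟨⟨Nat.div_dvd_of_dvd hdvd, hm0⟩, ?_⟩
    calc (m / d) * (m / d) ≤ (m / d) * d := Nat.mul_le_mul_left _ hle
      _ = m := Nat.div_mul_cancel hdvd
  case hl =>
    intro d hd
    simp only [Finset.mem_filter, Nat.mem_divisors] at hd
    exact Nat.div_div_self hd.1.1 hd.1.2
  case hr =>
    intro d hd
    simp only [Finset.mem_filter, Nat.mem_divisors] at hd
    exact Nat.div_div_self hd.1.1 hd.1.2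

lemma pairing (m : Nat) (hm : 1 ≤ m) :
    (∑ d ∈ m.divisors.filter (fun d => d * d ≤ m), (if d * d = m then (1:Int) else 2))
      = (m.divisors.card : Int) := by
  set S := m.divisors.filter (fun d => d * d ≤ m) with hS
  have hsum : (∑ d ∈ S, (if d * d = m then (1:Int) else 2))
      = (S.filter (fun d => d * d = m)).card * 1 + (S.filter (fun d => ¬ d * d = m)).card * 2 := by
    rw [← Finset.sum_filter_add_sum_filter_not S (fun d => d * d = m)]
    congr 1
    · rw [Finset.sum_congr rfl (fun d hd => if_pos (Finset.mem_filter.mp hd).2)]; simp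
    · rw [Finset.sum_congr rfl (fun d hd => if_neg (Finset.mem_filter.mp hd).2)]; simp [mul_comm]
  rw [hsum]
  -- Nat card bookkeeping
  have hES : (S.filter (fun d => d * d = m)).card + (S.filter (fun d => ¬ d * d = m)).card = S.card :=
    Finset.card_filter_add_card_filter_not _
  have hDS : (m.divisors.filter (fun d => d * d ≤ m)).card
      + (m.divisors.filter (fun d => ¬ d * d ≤ m)).card = m.divisors.card :=
    Finset.card_filter_add_card_filter_not _
  have hbij := small_large_card m hm
  rw [← hS] at hDS hbij
  -- split the large-or-equal side by equality
  have hLE : ((m.divisors.filter (fun d => m ≤ d * d)).filter (fun d => d * d = m)).card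
      + ((m.divisors.filter (fun d => m ≤ d * d)).filter (fun d => ¬ d * d = m)).card
      = (m.divisors.filter (fun d => m ≤ d * d)).card :=
    Finset.card_filter_add_card_filter_not _
  have hE1 : (m.divisors.filter (fun d => m ≤ d * d)).filter (fun d => d * d = m)
      = S.filter (fun d => d * d = m) := by
    rw [hS]; ext d; simp only [Finset.mem_filter]; constructor
    · rintro ⟨⟨h1, h2⟩, h3⟩; exact ⟨⟨h1, le_of_eq h3⟩, h3⟩
    · rintro ⟨⟨h1, h2⟩, h3⟩; exact ⟨⟨h1, ge_of_eq h3⟩, h3⟩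
  have hL1 : (m.divisors.filter (fun d => m ≤ d * d)).filter (fun d => ¬ d * d = m)
      = m.divisors.filter (fun d => ¬ d * d ≤ m) := by
    ext d; simp only [Finset.mem_filter]; constructor
    · rintro ⟨⟨h1, h2⟩, h3⟩; exact ⟨h1, by omega⟩
    · rintro ⟨h1, h2⟩; exact ⟨⟨h1, by omega⟩, by omega⟩
  rw [hE1, hL1] at hLE
  have key : (S.filter (fun d => d * d = m)).card * 1 + (S.filter (fun d => ¬ d * d = m)).card * 2
      = m.divisors.card := by omega
  exact_mod_cast congrArg (fun x : Nat => (x : Int)) key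

-- the two divisor sets used by the loop characterisation and the pairing lemma coincide
lemma ico_filter_eq (m : Nat) (hm : 1 ≤ m) :
    (Finset.Ico 1 (m + 1)).filter (fun d => d ∣ m ∧ d * d ≤ m)
      = m.divisors.filter (fun d => d * d ≤ m) := by
  ext d
  simp only [Finset.mem_filter, Finset.mem_Ico, Nat.mem_divisors]
  constructor
  · rintro ⟨⟨h1, h2⟩, h3, h4⟩; exact ⟨⟨h3, by omega⟩, h4⟩
  · rintro ⟨⟨h1, h2⟩, h3⟩
    have hd0 : 0 < d := Nat.pos_of_dvd_of_pos h1 (by omega)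
    have := Nat.le_of_dvd (by omega) h1
    exact ⟨⟨by omega, by omega⟩, h1, h3⟩

-- ===== VERDICT (by name: the statement is the Claim_ definition above) =====
theorem divnum_spec : Claim_equal_divnum := by
  intro n _
  unfold Spec_divnum divnum divnum_alt
  by_cases hn : n ≤ 0
  · rw [PySem.List.pyRange_one_eq_nil (by omega), divnumLoop.eq_def]
    rw [if_neg (by omega : ¬ (1:Int) * 1 ≤ n)]
    simp
  · have hn' : (0:Int) < n := by omega
    obtain ⟨m, rfl⟩ : ∃ m : Nat, n = (m:Int) := ⟨n.toNat, (Int.toNat_of_nonneg hn'.le).symm⟩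
    have hm : 1 ≤ m := by exact_mod_cast hn'
    have hB : divnumLoop (m:Int) 1 0 = (m.divisors.card : Int) := by
      have hloop := loop_eq m 1 hm le_rfl 0
      push_cast at hloop
      rw [hloop, zero_add, ico_filter_eq m hm, pairing m hm]
    simp only [a_count m hm, hB]
    by_cases h8 : (m.divisors.card : Int) = 8 <;> simp [h8]
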